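-- pv_equiv track=rewrite | github.com/gomate-community/TrustRAG | trustrag/modules/document/chunk.py | process_text_chunks
-- ===== SOURCE A (Python) =====
-- def process_text_chunks(chunks):
--     processed_chunks = []
--     for chunk in chunks:
--         # 处理连续的四个及以上换行符
--         while '\n\n\n\n' in chunk:
--             chunk = chunk.replace('\n\n\n\n', '\n\n')
--
--         # 处理连续的四个及以上空格
--         while '    ' in chunk:
--             chunk = chunk.replace('    ', '  ')
--
--         processed_chunks.append(chunk)
--
--     return processed_chunks
-- ===== SOURCE B (Python) =====
-- def process_text_chunks(chunks):
--     # One scan per chunk: each run of newlines/spaces is rewritten directly to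
--     # its fixed-point length, instead of repeated whole-string replace passes.
--     def fixpoint(k):
--         while k >= 4:
--             k -= 2 * (k // 4)
--         return k
--
--     out = []
--     for chunk in chunks:
--         parts = []
--         i = 0
--         n = len(chunk)
--         while i < n:
--             ch = chunk[i]
--             if ch == '\n' or ch == ' ':
--                 j = i
--                 while j < n and chunk[j] == ch:
--                     j += 1
--                 parts.append(ch * fixpoint(j - i))
--                 i = j
--             else:
--                 parts.append(ch)
--                 i += 1
--         out.append(''.join(parts))
--     return out
-- ===== Notes on version B (the rewrite author's own statement) =====
-- stated objective: alternative
-- what changed: Replaced the repeated whole-string replace-until-fixed-point loops with a single linear scan that rewrites each run of newlines/spaces to its fixed-point length computed arithmetically per run.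
import Mathlib
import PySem

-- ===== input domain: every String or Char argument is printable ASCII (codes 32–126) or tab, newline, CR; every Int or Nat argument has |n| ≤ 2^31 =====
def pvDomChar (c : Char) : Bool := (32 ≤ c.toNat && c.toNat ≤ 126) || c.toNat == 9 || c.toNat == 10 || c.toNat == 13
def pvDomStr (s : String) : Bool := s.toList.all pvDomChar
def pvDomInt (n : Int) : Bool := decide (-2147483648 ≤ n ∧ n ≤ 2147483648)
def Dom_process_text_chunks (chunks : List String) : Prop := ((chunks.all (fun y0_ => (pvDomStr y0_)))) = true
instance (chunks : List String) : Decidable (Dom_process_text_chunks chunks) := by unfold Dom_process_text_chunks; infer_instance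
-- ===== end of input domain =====

-- B replaces A's repeated whole-string replace-until-fixed-point loops by one linear scan
-- that rewrites each run of newlines/spaces to its fixed-point length (objective: alternative).

-- ===== PORT A =====
-- A's per-chunk code iterates s.replace(c*4, c*2) while c*4 occurs in s (for c = '\n', then c = ' ').
-- The next three definitions/lemmas exist only to justify termination of that while loop:
-- pvRep is a structural characterisation of one '.replace(c*4, c*2)' pass, proved equal to
-- PySem.Chars.replace and shown to strictly shrink the string while 'c*4 in s' holds.
def pvRep (c : Char) : List Char → List Char
  | [] => []
  | x :: t =>
    if (List.replicate 4 c).isPrefixOf (x :: t) then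
      List.replicate 2 c ++ pvRep c (t.drop 3)
    else
      x :: pvRep c t
termination_by s => s.length
decreasing_by
  all_goals (simp; try omega)

theorem pvRep_go (c : Char) :
    ∀ (fuel : Nat) (l acc : List Char), l.length ≤ fuel →
      PySem.Chars.replace.go (List.replicate 4 c) (List.replicate 2 c) fuel l acc
        = acc.reverse ++ pvRep c l := by
  intro fuel
  induction fuel with
  | zero =>
    intro l acc hl
    have hnil : l = [] := List.length_eq_zero_iff.mp (Nat.le_zero.mp hl)
    subst hnil
    simp [PySem.Chars.replace.go, pvRep]
  | succ n ih =>
    intro l acc hl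
    cases l with
    | nil => simp [PySem.Chars.replace.go, pvRep]
    | cons x t =>
      rw [PySem.Chars.replace.go]
      split
      · rename_i hpre
        rw [ih _ _ (by simp at hl ⊢; omega)]
        rw [pvRep, if_pos hpre]
        simp
      · rename_i hpre
        rw [ih t (x :: acc) (by simpa using hl)]
        rw [pvRep, if_neg hpre]
        simp

theorem pvRep_eq_replace (c : Char) (s : List Char) :
    PySem.Chars.replace s (List.replicate 4 c) (List.replicate 2 c) = pvRep c s := by
  unfold PySem.Chars.replace
  rw [if_neg (by simp)]
  simpa using pvRep_go c s.length s [] le_rfl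

theorem pvRep_length_le (c : Char) : ∀ s : List Char, (pvRep c s).length ≤ s.length
  | [] => by simp [pvRep]
  | x :: t => by
    rw [pvRep]
    split
    · rename_i hpre
      have h4 : 4 ≤ t.length + 1 := by simpa using (List.isPrefixOf_iff_prefix.mp hpre).length_le
      have hle := pvRep_length_le c (t.drop 3)
      simp at hle ⊢
      omega
    · have hle := pvRep_length_le c t
      simp
      omega
termination_by s => s.length
decreasing_by all_goals (simp; try omega)

theorem pvRep_length_lt (c : Char) :
    ∀ s : List Char, PySem.Chars.isIn (List.replicate 4 c) s = true →
      (pvRep c s).length < s.length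
  | [] => by
    intro h
    rw [PySem.Chars.isIn_iff_infix] at h
    simp at h
  | x :: t => by
    intro h
    rw [pvRep]
    split
    · rename_i hpre
      have h4 : 4 ≤ t.length + 1 := by simpa using (List.isPrefixOf_iff_prefix.mp hpre).length_le
      have hle := pvRep_length_le c (t.drop 3)
      simp at hle ⊢
      omega
    · rename_i hpre
      have ht : PySem.Chars.isIn (List.replicate 4 c) t = true := by
        rw [← PySem.Chars.exists_prefix_drop_iff_isIn] at h ⊢
        obtain ⟨j, hj⟩ := h
        cases j with
        | zero =>
          rw [List.drop_zero] at hj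
          exact absurd (List.isPrefixOf_iff_prefix.mpr hj) (by simpa using hpre)
        | succ m => exact ⟨m, by simpa using hj⟩
      have := pvRep_length_lt c t ht
      simp
      omega
termination_by s => s.length
decreasing_by all_goals (simp; try omega)

theorem pvReplace_length_lt (c : Char) (s : List Char)
    (h : PySem.Chars.isIn (List.replicate 4 c) s = true) :
    (PySem.Chars.replace s (List.replicate 4 c) (List.replicate 2 c)).length < s.length := by
  rw [pvRep_eq_replace]; exact pvRep_length_lt c s h

-- 'while c*4 in chunk: chunk = chunk.replace(c*4, c*2)' (List.replicate 4 c is the literal "\n\n\n\n" / "    ")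
def pvWhileRep (c : Char) (s : List Char) : List Char :=
  if h : PySem.Chars.isIn (List.replicate 4 c) s = true then
    pvWhileRep c (PySem.Chars.replace s (List.replicate 4 c) (List.replicate 2 c))
  else s
termination_by s.length
decreasing_by exact pvReplace_length_lt c s h

def process_text_chunks (chunks : List String) : List String :=
  chunks.foldl (fun acc chunk =>
    acc ++ [String.ofList (pvWhileRep ' ' (pvWhileRep '\n' chunk.toList))]) []

-- ===== PORT B =====
-- fixpoint(k): while k >= 4: k -= 2 * (k // 4)
def pvFix (k : Nat) : Nat :=
  if k < 4 then k else pvFix (k - 2 * (k / 4))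
termination_by k
decreasing_by omega

-- Source B's single scan: peel the leading run (the inner 'while j' loop = takeWhile),
-- emit ch * fixpoint(runlen) for '\n'/' ', copy other characters unchanged.
def pvCollapse : List Char → List Char
  | [] => []
  | x :: t =>
    if x = '\n' ∨ x = ' ' then
      List.replicate (pvFix (1 + (t.takeWhile (· == x)).length)) x ++ pvCollapse (t.dropWhile (· == x))
    else
      x :: pvCollapse t
termination_by s => s.length
decreasing_by
  · have := List.length_dropWhile_le (· == x) t; simp; omega
  · simp

def process_text_chunks_alt (chunks : List String) : List String :=
  chunks.map (fun chunk => String.ofList (pvCollapse chunk.toList))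

-- ===== PRECONDITION & SPEC =====
def Spec_process_text_chunks (chunks : List String) (out : List String) : Prop := out = process_text_chunks_alt chunks
instance (chunks : List String) (out : List String) : Decidable (Spec_process_text_chunks chunks out) := by unfold Spec_process_text_chunks; infer_instance

-- ===== CLAIM (what is proved, stated in full; the proofs are below) =====
def Claim_equal_process_text_chunks : Prop := ∀ (chunks : List String), Dom_process_text_chunks chunks → Spec_process_text_chunks chunks (process_text_chunks chunks)

-- ===== LEMMAS AND PROOFS =====

-- single-character analogue of pvCollapse, used only in the proofs
def pvColg (c : Char) : List Char → List Char
  | [] => []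
  | x :: t =>
    if x = c then
      List.replicate (pvFix (1 + (t.takeWhile (· == c)).length)) c ++ pvColg c (t.dropWhile (· == c))
    else
      x :: pvColg c t
termination_by s => s.length
decreasing_by
  · have := List.length_dropWhile_le (· == c) t; simp; omega
  · simp

theorem pvHeadDropWhile (p : Char → Bool) :
    ∀ (l : List Char) (a : Char), (l.dropWhile p).head? = some a → p a = false := by
  intro l
  induction l with
  | nil => simp
  | cons x t ih =>
    intro a
    rw [List.dropWhile_cons]
    split
    · exact ih a
    · rename_i hp
      intro h
      simp at h
      subst h
      simpa using hp

theorem pvDecomp (x : Char) (t : List Char) :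
    x :: t = List.replicate (1 + (t.takeWhile (· == x)).length) x ++ t.dropWhile (· == x) ∧
    (t.dropWhile (· == x)).head? ≠ some x ∧
    (t.dropWhile (· == x)).length ≤ t.length := by
  have ht : t.takeWhile (· == x) = List.replicate (t.takeWhile (· == x)).length x := by
    rw [List.eq_replicate_iff]
    exact ⟨rfl, fun b hb => by simpa using List.mem_takeWhile_imp hb⟩
  refine ⟨?_, ?_, List.length_dropWhile_le _ _⟩
  · calc x :: t = x :: (t.takeWhile (· == x) ++ t.dropWhile (· == x)) := by
          rw [List.takeWhile_append_dropWhile]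
      _ = List.replicate (1 + (t.takeWhile (· == x)).length) x ++ t.dropWhile (· == x) := by
          rw [Nat.add_comm, List.replicate_succ, List.cons_append, ← ht]
  · intro h
    have := pvHeadDropWhile (· == x) t x h
    simp at this

theorem pvTakeWhileRep (c : Char) (k : Nat) (rest : List Char) (h : rest.head? ≠ some c) :
    (List.replicate k c ++ rest).takeWhile (· == c) = List.replicate k c := by
  induction k with
  | zero =>
    simp only [List.replicate_zero, List.nil_append]
    cases rest with
    | nil => simp
    | cons a r =>
      have ha : a ≠ c := by simpa using h
      simp [ha]
  | succ n ih => simp [List.replicate_succ, ih]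

theorem pvDropWhileRep (c : Char) (k : Nat) (rest : List Char) (h : rest.head? ≠ some c) :
    (List.replicate k c ++ rest).dropWhile (· == c) = rest := by
  induction k with
  | zero =>
    simp only [List.replicate_zero, List.nil_append]
    cases rest with
    | nil => simp
    | cons a r =>
      have ha : a ≠ c := by simpa using h
      simp [ha]
  | succ n ih => simp [List.replicate_succ, ih]

theorem pvPrefixRep (c : Char) :
    ∀ (n k : Nat) (rest : List Char), rest.head? ≠ some c →
      (List.replicate n c <+: List.replicate k c ++ rest ↔ n ≤ k) := by
  intro n
  induction n with
  | zero => intro k rest h; simp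
  | succ n ih =>
    intro k rest h
    cases k with
    | zero =>
      simp only [List.replicate_zero, List.nil_append, List.replicate_succ]
      constructor
      · intro hp
        cases rest with
        | nil => simp at hp
        | cons a r =>
          rw [List.cons_prefix_cons] at hp
          exact absurd (by simp [hp.1.symm] : (a :: r).head? = some c) h
      · omega
    | succ m =>
      simp only [List.replicate_succ, List.cons_append, List.cons_prefix_cons]
      simp [ih m rest h]

theorem pvIsInRep (c : Char) (k : Nat) (rest : List Char) (h : rest.head? ≠ some c) :
    PySem.Chars.isIn (List.replicate 4 c) (List.replicate k c ++ rest) = true ↔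
      4 ≤ k ∨ PySem.Chars.isIn (List.replicate 4 c) rest = true := by
  rw [← PySem.Chars.exists_prefix_drop_iff_isIn]
  constructor
  · rintro ⟨j, hp⟩
    rw [List.drop_append, List.drop_replicate, List.length_replicate] at hp
    by_cases hjk : j ≤ k
    · have h0 : j - k = 0 := by omega
      rw [h0, List.drop_zero] at hp
      left
      have := (pvPrefixRep c 4 (k - j) rest h).mp hp
      omega
    · have hk0 : k - j = 0 := by omega
      rw [hk0, List.replicate_zero, List.nil_append] at hp
      right
      rw [← PySem.Chars.exists_prefix_drop_iff_isIn]
      exact ⟨j - k, hp⟩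
  · rintro (hk | hrest)
    · exact ⟨0, by rw [List.drop_zero]; exact (pvPrefixRep c 4 k rest h).mpr hk⟩
    · rw [← PySem.Chars.exists_prefix_drop_iff_isIn] at hrest
      obtain ⟨j, hp⟩ := hrest
      refine ⟨k + j, ?_⟩
      rw [List.drop_append, List.drop_replicate, List.length_replicate]
      have h1 : k - (k + j) = 0 := by omega
      have h2 : k + j - k = j := by omega
      rw [h1, h2, List.replicate_zero, List.nil_append]
      exact hp

theorem pvIsInCons (sub : List Char) (x : Char) (t : List Char)
    (h : PySem.Chars.isIn sub t = true) : PySem.Chars.isIn sub (x :: t) = true := by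
  rw [← PySem.Chars.exists_prefix_drop_iff_isIn] at h ⊢
  obtain ⟨j, hp⟩ := h
  exact ⟨j + 1, by simpa using hp⟩

theorem pvFix_lt4 {k : Nat} (h : k < 4) : pvFix k = k := by
  rw [pvFix]; simp [h]

theorem pvFix_step {k : Nat} (h : 4 ≤ k) : pvFix k = pvFix (k - 2 * (k / 4)) := by
  rw [pvFix]; simp [Nat.not_lt.mpr h]

theorem pvFix_pos : ∀ k : Nat, 1 ≤ k → 1 ≤ pvFix k := fun k h => by
  rw [pvFix]
  split
  · exact h
  · rename_i hk
    exact pvFix_pos (k - 2 * (k / 4)) (by omega)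
termination_by k => k
decreasing_by omega

theorem pvRep_cons_ne (c x : Char) (t : List Char) (h : x ≠ c) :
    pvRep c (x :: t) = x :: pvRep c t := by
  rw [pvRep, if_neg]
  intro hpre
  have := List.isPrefixOf_iff_prefix.mp hpre
  rw [show List.replicate 4 c = c :: List.replicate 3 c from rfl, List.cons_prefix_cons] at this
  exact h this.1.symm

theorem pvRep_run (c : Char) :
    ∀ (k : Nat) (rest : List Char), rest.head? ≠ some c →
      pvRep c (List.replicate k c ++ rest)
        = List.replicate (k - 2 * (k / 4)) c ++ pvRep c rest := fun k rest h => by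
  by_cases h4 : 4 ≤ k
  · have hsplit : List.replicate k c ++ rest = c :: (List.replicate (k - 1) c ++ rest) := by
      cases k with
      | zero => omega
      | succ m => simp [List.replicate_succ]
    rw [hsplit, pvRep, if_pos (by
      rw [← List.cons_append, show c :: List.replicate (k - 1) c = List.replicate k c from by
            rw [← List.replicate_succ]; congr 1; omega]
      exact List.isPrefixOf_iff_prefix.mpr ((pvPrefixRep c 4 k rest h).mpr h4))]
    have hdrop : (List.replicate (k - 1) c ++ rest).drop 3 = List.replicate (k - 4) c ++ rest := by
      rw [List.drop_append, List.drop_replicate, List.length_replicate,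
          show 3 - (k - 1) = 0 from by omega, List.drop_zero,
          show k - 1 - 3 = k - 4 from by omega]
    rw [hdrop, pvRep_run c (k - 4) rest h, ← List.append_assoc, ← List.replicate_add]
    congr 2
    omega
  · cases k with
    | zero => simp
    | succ m =>
      have hm : m < 4 := by omega
      rw [show List.replicate (m + 1) c ++ rest = c :: (List.replicate m c ++ rest) from by
            simp [List.replicate_succ]]
      rw [pvRep, if_neg (by
        rw [← List.cons_append, ← List.replicate_succ]
        intro hpre
        exact h4 ((pvPrefixRep c 4 (m + 1) rest h).mp (List.isPrefixOf_iff_prefix.mp hpre)))]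
      rw [pvRep_run c m rest h]
      rw [show m - 2 * (m / 4) = m from by omega, show m + 1 - 2 * ((m + 1) / 4) = m + 1 from by omega,
          List.replicate_succ, List.cons_append]
termination_by k rest h => k
decreasing_by all_goals omega

theorem pvColg_run (c : Char) (k : Nat) (rest : List Char) (h : rest.head? ≠ some c) :
    pvColg c (List.replicate k c ++ rest) = List.replicate (pvFix k) c ++ pvColg c rest := by
  cases k with
  | zero => rw [pvFix]; simp
  | succ m =>
    rw [show List.replicate (m + 1) c ++ rest = c :: (List.replicate m c ++ rest) from by
          simp [List.replicate_succ]]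
    rw [pvColg, if_pos rfl, pvTakeWhileRep c m rest h, pvDropWhileRep c m rest h,
        List.length_replicate, Nat.add_comm]

theorem pvCollapse_run (c : Char) (hc : c = '\n' ∨ c = ' ') (k : Nat) (rest : List Char)
    (h : rest.head? ≠ some c) :
    pvCollapse (List.replicate k c ++ rest) = List.replicate (pvFix k) c ++ pvCollapse rest := by
  cases k with
  | zero => rw [pvFix]; simp
  | succ m =>
    rw [show List.replicate (m + 1) c ++ rest = c :: (List.replicate m c ++ rest) from by
          simp [List.replicate_succ]]
    rw [pvCollapse, if_pos hc, pvTakeWhileRep c m rest h, pvDropWhileRep c m rest h,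
        List.length_replicate, Nat.add_comm]

theorem pvColg_cons_ne (c x : Char) (t : List Char) (h : x ≠ c) :
    pvColg c (x :: t) = x :: pvColg c t := by
  rw [pvColg]; simp [h]

theorem pvCollapse_cons_ne (x : Char) (t : List Char) (h : ¬(x = '\n' ∨ x = ' ')) :
    pvCollapse (x :: t) = x :: pvCollapse t := by
  rw [pvCollapse]; simp [h]

theorem pvColg_pass (c d : Char) (hd : d ≠ c) :
    ∀ (m : Nat) (l : List Char),
      pvColg c (List.replicate m d ++ l) = List.replicate m d ++ pvColg c l := by
  intro m
  induction m with
  | zero => simp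
  | succ n ih =>
    intro l
    simp only [List.replicate_succ, List.cons_append]
    rw [pvColg_cons_ne c d _ hd, ih l]

theorem pvHeadColg (c d : Char) (hcd : c ≠ d) :
    ∀ l : List Char, l.head? ≠ some d → (pvColg c l).head? ≠ some d := by
  intro l hl
  cases l with
  | nil => simp [pvColg]
  | cons x t =>
    by_cases hx : x = c
    · subst hx
      rw [pvColg, if_pos rfl]
      have h1 : 1 ≤ pvFix (1 + (t.takeWhile (· == x)).length) := pvFix_pos _ (by omega)
      obtain ⟨m, hm⟩ : ∃ m, pvFix (1 + (t.takeWhile (· == x)).length) = m + 1 :=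
        ⟨pvFix (1 + (t.takeWhile (· == x)).length) - 1, by omega⟩
      rw [hm, List.replicate_succ]
      simpa using hcd
    · rw [pvColg_cons_ne c x t hx]
      simpa using (show x ≠ d from by simpa using hl)

theorem pvHeadRep (c : Char) :
    ∀ l : List Char, l.head? ≠ some c → (pvRep c l).head? ≠ some c := by
  intro l hl
  cases l with
  | nil => simp [pvRep]
  | cons x t =>
    have hx : x ≠ c := by simpa using hl
    rw [pvRep_cons_ne c x t hx]
    simpa using hx

theorem pvRunInduction (c : Char) (P : List Char → Prop) (h0 : P [])
    (h1 : ∀ x t, x ≠ c → P t → P (x :: t))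
    (h2 : ∀ k rest, 1 ≤ k → rest.head? ≠ some c → P rest → P (List.replicate k c ++ rest)) :
    ∀ s, P s := by
  have aux : ∀ n s, s.length ≤ n → P s := by
    intro n
    induction n with
    | zero =>
      intro s hs
      rw [List.length_eq_zero_iff.mp (Nat.le_zero.mp hs)]
      exact h0
    | succ n ih =>
      intro s hs
      cases s with
      | nil => exact h0
      | cons x t =>
        simp only [List.length_cons] at hs
        by_cases hx : x = c
        · subst hx
          obtain ⟨hdec, hhead, hlen⟩ := pvDecomp x t
          rw [hdec]
          exact h2 _ _ (by omega) hhead (ih _ (by omega))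
        · exact h1 x t hx (ih t (by omega))
  intro s
  exact aux s.length s le_rfl

theorem pvColg_pvRep (c : Char) : ∀ s, pvColg c (pvRep c s) = pvColg c s := by
  refine pvRunInduction c _ ?_ ?_ ?_
  · simp [pvRep]
  · intro x t hx ih
    rw [pvRep_cons_ne c x t hx, pvColg_cons_ne c x _ hx, pvColg_cons_ne c x t hx, ih]
  · intro k rest hk hhead ih
    have hfix : pvFix (k - 2 * (k / 4)) = pvFix k := by
      by_cases h4 : 4 ≤ k
      · exact (pvFix_step h4).symm
      · rw [show k - 2 * (k / 4) = k from by omega]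
    rw [pvRep_run c k rest hhead, pvColg_run c _ _ (pvHeadRep c rest hhead), ih, hfix,
        pvColg_run c k rest hhead]

theorem pvColg_id (c : Char) :
    ∀ s, PySem.Chars.isIn (List.replicate 4 c) s = false → pvColg c s = s := by
  refine pvRunInduction c
    (fun s => PySem.Chars.isIn (List.replicate 4 c) s = false → pvColg c s = s) ?_ ?_ ?_
  · intro _; simp [pvColg]
  · intro x t hx ih hin
    have ht : PySem.Chars.isIn (List.replicate 4 c) t = false := by
      by_cases hb : PySem.Chars.isIn (List.replicate 4 c) t = true
      · rw [pvIsInCons _ x t hb] at hin; cases hin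
      · simpa using hb
    rw [pvColg_cons_ne c x t hx, ih ht]
  · intro k rest hk hhead ih hin
    have hno : ¬(4 ≤ k ∨ PySem.Chars.isIn (List.replicate 4 c) rest = true) := fun hor => by
      rw [(pvIsInRep c k rest hhead).mpr hor] at hin
      cases hin
    have h4 : k < 4 := by
      by_contra hcon
      exact hno (Or.inl (by omega))
    have hrest : PySem.Chars.isIn (List.replicate 4 c) rest = false := by
      by_cases hb : PySem.Chars.isIn (List.replicate 4 c) rest = true
      · exact absurd (Or.inr hb) hno
      · simpa using hb
    rw [pvColg_run c k rest hhead, pvFix_lt4 h4, ih hrest]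

theorem pvWhileRep_eq (c : Char) : ∀ s, pvWhileRep c s = pvColg c s := fun s => by
  rw [pvWhileRep]
  split
  · rename_i h
    rw [pvRep_eq_replace, pvWhileRep_eq c (pvRep c s)]
    exact pvColg_pvRep c s
  · rename_i h
    exact (pvColg_id c s (by simpa using h)).symm
termination_by s => s.length
decreasing_by exact pvRep_length_lt c s (by assumption)

theorem pvCollapse_eq : ∀ s, pvCollapse s = pvColg ' ' (pvColg '\n' s) := by
  have aux : ∀ n s, s.length ≤ n → pvCollapse s = pvColg ' ' (pvColg '\n' s) := by
    intro n
    induction n with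
    | zero =>
      intro s hs
      rw [List.length_eq_zero_iff.mp (Nat.le_zero.mp hs)]
      simp [pvCollapse, pvColg]
    | succ n ih =>
      intro s hs
      cases s with
      | nil => simp [pvCollapse, pvColg]
      | cons x t =>
        simp only [List.length_cons] at hs
        by_cases hn : x = '\n'
        · subst hn
          obtain ⟨hdec, hhead, hlen⟩ := pvDecomp '\n' t
          rw [hdec, pvCollapse_run '\n' (Or.inl rfl) _ _ hhead,
              pvColg_run '\n' _ _ hhead, pvColg_pass ' ' '\n' (by decide),
              ih _ (by omega)]
        · by_cases hsp : x = ' '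
          · subst hsp
            obtain ⟨hdec, hhead, hlen⟩ := pvDecomp ' ' t
            rw [hdec, pvCollapse_run ' ' (Or.inr rfl) _ _ hhead,
                pvColg_pass '\n' ' ' (by decide),
                pvColg_run ' ' _ _ (pvHeadColg '\n' ' ' (by decide) _ hhead),
                ih _ (by omega)]
          · rw [pvCollapse_cons_ne x t (by tauto), pvColg_cons_ne '\n' x t hn,
                pvColg_cons_ne ' ' x _ hsp, ih t (by omega)]
  intro s
  exact aux s.length s le_rfl

-- ===== VERDICT (by name: the statement is the Claim_ definition above) =====
theorem process_text_chunks_spec : Claim_equal_process_text_chunks := by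
  intro chunks _
  unfold Spec_process_text_chunks process_text_chunks process_text_chunks_alt
  rw [PySem.List.foldl_append_singleton_eq_map]
  rw [List.nil_append]
  refine List.map_congr_left ?_
  intro chunk _
  rw [pvWhileRep_eq, pvWhileRep_eq, ← pvCollapse_eq]
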